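-- pv_equiv track=rewrite | github.com/IhToN/DAW1-PRG | Ejercicios/Ejercicio49.py | letras_texto
-- ===== SOURCE A (Python) =====
-- def letras_texto(texto):
--     """ Devuelve un diccionario tal que cada par es letra - set(palabras que contiene letra)
--     """
--     ret = dict()
--     texto = texto.replace(".", "").replace(",", "").replace("-", "").lower()
--     palabras = texto.split()
--     for letra in texto:
--         if letra not in ret:
--             ret[letra] = contiene_letra(letra, palabras)
--     return ret
--
-- def contiene_letra(letra, palabras):
--     """ Devuelve un set con las palabras que contienen la letra
--     """
--     ret = set()
--     for palabra in palabras: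
--         if letra in palabra and palabra not in ret:
--             ret.add(palabra)
--     return ret
-- ===== SOURCE B (Python) =====
-- def letras_texto(texto):
--     """ Devuelve un diccionario tal que cada par es letra - set(palabras que contiene letra) """
--     texto = texto.replace(".", "").replace(",", "").replace("-", "").lower()
--     index = {}
--     for palabra in texto.split():
--         for letra in palabra:
--             index.setdefault(letra, {})[palabra] = None
--     return {letra: set(index.get(letra, ())) for letra in texto}
-- ===== Notes on version B (the rewrite author's own statement) =====
-- stated objective: alternative
-- what changed: Instead of scanning the whole word list once per distinct character, B makes a single pass over the words building an inverted index char->words and then emits it in first-occurrence order of the text's characters.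
import Mathlib
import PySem

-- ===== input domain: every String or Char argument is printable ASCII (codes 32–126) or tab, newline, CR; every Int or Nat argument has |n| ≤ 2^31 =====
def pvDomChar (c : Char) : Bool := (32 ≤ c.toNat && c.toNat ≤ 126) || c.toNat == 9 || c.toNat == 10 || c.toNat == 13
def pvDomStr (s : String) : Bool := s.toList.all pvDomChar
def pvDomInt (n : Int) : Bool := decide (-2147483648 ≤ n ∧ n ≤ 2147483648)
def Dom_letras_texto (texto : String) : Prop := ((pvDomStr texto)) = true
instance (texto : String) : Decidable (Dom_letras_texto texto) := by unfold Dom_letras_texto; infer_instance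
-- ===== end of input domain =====

-- B (alternative decomposition): instead of A's per-distinct-character scan of the whole word list, B builds an inverted index char->words in a single pass over the words and emits it in first-occurrence order of the text's characters.

-- ===== PORT A =====
def contiene_letra (letra : String) (palabras : List String) : List String :=
  palabras.foldl (fun ret palabra =>
    if PySem.Str.isIn letra palabra && !(PySem.Set.contains ret palabra)
    then PySem.Set.add ret palabra else ret) PySem.Set.empty

def letras_texto (texto : String) : List (String × List String) :=
  let t := PySem.Str.lower (PySem.Str.replace (PySem.Str.replace (PySem.Str.replace texto "." "") "," "") "-" "")
  let palabras := PySem.Str.split₀ t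
  (t.toList.foldl (fun ret letra =>
      let s := String.ofList [letra]
      if !(PySem.Dict.contains ret s)
      then PySem.Dict.insert ret s (contiene_letra s palabras) else ret)
    PySem.Dict.empty).items

-- ===== PORT B =====
def letras_texto_alt (texto : String) : List (String × List String) :=
  let t := PySem.Str.lower (PySem.Str.replace (PySem.Str.replace (PySem.Str.replace texto "." "") "," "") "-" "")
  let index : PySem.Dict String (PySem.Dict String Unit) :=
    (PySem.Str.split₀ t).foldl (fun idx palabra =>
      palabra.toList.foldl (fun idx letra =>
        let s := String.ofList [letra]
        idx.insert s ((idx.getD s PySem.Dict.empty).insert palabra ())) idx)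
      PySem.Dict.empty
  (t.toList.foldl (fun ret letra =>
      let s := String.ofList [letra]
      ret.insert s (PySem.Set.ofList (PySem.Dict.keys (index.getD s PySem.Dict.empty))))
    PySem.Dict.empty).items

-- ===== PRECONDITION & SPEC =====
def Spec_letras_texto (texto : String) (out : List (String × List String)) : Prop := out = letras_texto_alt texto
instance (texto : String) (out : List (String × List String)) : Decidable (Spec_letras_texto texto out) := by unfold Spec_letras_texto; infer_instance

-- ===== CLAIM (what is proved, stated in full; the proofs are below) =====
def Claim_equal_letras_texto : Prop := ∀ (texto : String), Dom_letras_texto texto → Spec_letras_texto texto (letras_texto texto)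

-- ===== LEMMAS AND PROOFS =====
theorem keys_insert_eq_add {ν : Type} (d : PySem.Dict String ν) (k : String) (v : ν) :
    (d.insert k v).keys = PySem.Set.add d.keys k := by
  rw [PySem.Set.add_eq_ite]
  by_cases h : d.contains k = true
  · rw [PySem.Dict.keys_insert_of_contains d v h, if_pos ((PySem.Dict.contains_iff_mem_keys d k).1 h)]
  · rw [PySem.Dict.keys_insert_of_not_contains d v (by simpa using h),
      if_neg (fun hm => h ((PySem.Dict.contains_iff_mem_keys d k).2 hm))]

theorem insert_self_value {ν : Type} (d : PySem.Dict String ν) (k : String) (v : ν)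
    (hnd : d.keys.Nodup) (h : d.get? k = some v) : d.insert k v = d := by
  apply PySem.Dict.ext
  rw [PySem.Dict.items_insert_of_contains d v (by simp [PySem.Dict.contains_eq_isSome_get?, h])]
  conv_rhs => rw [← List.map_id d.items]
  apply List.map_congr_left
  rintro ⟨p1, p2⟩ hp
  by_cases hk : (p1 == k) = true
  · have hk' : p1 = k := by simpa using hk
    subst hk'
    have hv := PySem.Dict.get?_of_mem_items d hp hnd
    rw [h] at hv
    simp [Option.some_inj.1 hv]
  · simp [hk]

theorem singleton_str_inj {c c' : Char} (h : String.ofList [c] = String.ofList [c']) : c = c' := by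
  simpa using congrArg String.toList h

theorem inner_word (w : String) (cs : List Char) (idx : PySem.Dict String (PySem.Dict String Unit)) (c : Char) :
    ((cs.foldl (fun idx letra =>
        idx.insert (String.ofList [letra]) ((idx.getD (String.ofList [letra]) PySem.Dict.empty).insert w ())) idx).getD
      (String.ofList [c]) PySem.Dict.empty).keys
    = (if c ∈ cs then PySem.Set.add ((idx.getD (String.ofList [c]) PySem.Dict.empty).keys) w
       else ((idx.getD (String.ofList [c]) PySem.Dict.empty).keys)) := by
  induction cs generalizing idx with
  | nil => simp
  | cons c' rest ih =>
    simp only [List.foldl_cons, ih, List.mem_cons]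
    by_cases hc : c = c'
    · subst hc
      rw [PySem.Dict.getD_insert, if_pos rfl]
      simp only [keys_insert_eq_add]
      by_cases hm : c ∈ rest
      · simp [hm]
      · simp [hm]
    · have hne : String.ofList [c] ≠ String.ofList [c'] := fun h => hc (singleton_str_inj h)
      rw [PySem.Dict.getD_insert, if_neg hne]
      by_cases hm : c ∈ rest <;> simp [hm, hc]

theorem isIn_singleton (c : Char) (w : String) :
    PySem.Str.isIn (String.ofList [c]) w = w.toList.contains c := by
  have h := PySem.Str.isIn_iff_infix (sub := String.ofList [c]) (s := w)
  rcases hb : PySem.Str.isIn (String.ofList [c]) w with _ | _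
  · rw [hb] at h; simp at h ⊢
    intro hm; exact h ((List.singleton_infix_iff c w.toList).2 hm)
  · rw [hb] at h; simp at h ⊢
    exact (List.singleton_infix_iff c w.toList).1 h

theorem step_eq (c : Char) (w : String) (r : List String) :
    (if PySem.Str.isIn (String.ofList [c]) w && !(PySem.Set.contains r w)
     then PySem.Set.add r w else r)
    = if c ∈ w.toList then PySem.Set.add r w else r := by
  rw [isIn_singleton]
  by_cases hr : w ∈ r
  · by_cases hm : c ∈ w.toList <;> simp [hm, hr]
  · by_cases hm : c ∈ w.toList <;> simp [hm, hr]

theorem index_buckets (ws : List String) (idx : PySem.Dict String (PySem.Dict String Unit))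
    (f : Char → List String) (hf : ∀ c, ((idx.getD (String.ofList [c]) PySem.Dict.empty).keys) = f c) (c : Char) :
    ((ws.foldl (fun idx palabra =>
        palabra.toList.foldl (fun idx letra =>
          idx.insert (String.ofList [letra]) ((idx.getD (String.ofList [letra]) PySem.Dict.empty).insert palabra ())) idx)
      idx).getD (String.ofList [c]) PySem.Dict.empty).keys
    = ws.foldl (fun ret palabra =>
        if PySem.Str.isIn (String.ofList [c]) palabra && !(PySem.Set.contains ret palabra)
        then PySem.Set.add ret palabra else ret) (f c) := by
  induction ws generalizing idx f with
  | nil => simpa using hf c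
  | cons w rest ih =>
    simp only [List.foldl_cons, step_eq]
    rw [ih _ (fun c => if c ∈ w.toList then PySem.Set.add (f c) w else f c)
        (fun c => by rw [inner_word, hf c])]
    exact PySem.List.foldl_congr_mem _ _ _ _ (fun acc x _ => step_eq c x acc)

theorem outer_fold (V : Char → List String) (cs : List Char) (d : PySem.Dict String (List String))
    (hnd : d.keys.Nodup)
    (hd : ∀ c, d.get? (String.ofList [c]) = none ∨ d.get? (String.ofList [c]) = some (V c)) :
    cs.foldl (fun ret letra =>
      if !(PySem.Dict.contains ret (String.ofList [letra]))
      then PySem.Dict.insert ret (String.ofList [letra]) (V letra) else ret) d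
    = cs.foldl (fun ret letra => ret.insert (String.ofList [letra]) (V letra)) d := by
  induction cs generalizing d with
  | nil => rfl
  | cons c rest ih =>
    simp only [List.foldl_cons]
    by_cases hc : d.contains (String.ofList [c]) = true
    · have hg : d.get? (String.ofList [c]) = some (V c) := by
        rcases hd c with h | h
        · rw [PySem.Dict.contains_eq_isSome_get?, h] at hc; simp at hc
        · exact h
      rw [hc, insert_self_value d _ _ hnd hg]
      simp only [Bool.not_true, Bool.false_eq_true, if_false]
      exact ih d hnd hd
    · rw [Bool.not_eq_true] at hc
      rw [hc]
      simp only [Bool.not_false, if_true]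
      refine ih _ (PySem.Dict.nodup_keys_insert _ _ _ hnd) (fun c' => ?_)
      rw [PySem.Dict.get?_insert]
      by_cases he : String.ofList [c'] = String.ofList [c]
      · have : c' = c := singleton_str_inj he
        subst this
        simp
      · simp [he, hd c']
theorem contiene_nodup (letra : String) (ws : List String) (s : List String) (hs : s.Nodup) :
    (ws.foldl (fun ret palabra =>
      if PySem.Str.isIn letra palabra && !(PySem.Set.contains ret palabra)
      then PySem.Set.add ret palabra else ret) s).Nodup := by
  induction ws generalizing s with
  | nil => exact hs
  | cons w rest ih =>
    simp only [List.foldl_cons]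
    split
    · exact ih _ (PySem.Set.nodup_add _ _ hs)
    · exact ih _ hs

-- ===== VERDICT (by name: the statement is the Claim_ definition above) =====
theorem letras_texto_spec : Claim_equal_letras_texto := by
  intro texto _
  show letras_texto texto = letras_texto_alt texto
  unfold letras_texto letras_texto_alt
  simp only []
  generalize PySem.Str.lower
      (PySem.Str.replace (PySem.Str.replace (PySem.Str.replace texto "." "") "," "") "-" "") = t
  generalize hws : PySem.Str.split₀ t = ws
  have hV : ∀ c, PySem.Set.ofList
      (((ws.foldl (fun idx palabra =>
          palabra.toList.foldl (fun idx letra =>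
            idx.insert (String.ofList [letra])
              ((idx.getD (String.ofList [letra]) PySem.Dict.empty).insert palabra ())) idx)
        PySem.Dict.empty).getD (String.ofList [c]) PySem.Dict.empty).keys)
      = contiene_letra (String.ofList [c]) ws := by
    intro c
    rw [index_buckets ws PySem.Dict.empty (fun _ => []) (fun c => by simp) c]
    exact PySem.Set.ofList_eq_self_of_nodup _ (contiene_nodup _ _ [] List.nodup_nil)
  apply congrArg PySem.Dict.items
  refine (outer_fold (fun c => contiene_letra (String.ofList [c]) ws) t.toList PySem.Dict.empty
      (by simp) (fun c => Or.inl (by simp))).trans ?_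
  exact (PySem.List.foldl_congr_mem _ _ _ _ (fun acc c _ => by rw [hV c])).symm
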